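-- pv_equiv track=rewrite | github.com/Ringbo/HebCup | source/CIUAnalyzer.py | oneWordDiff
-- ===== SOURCE A (Python) =====
-- def oneWordDiff(srcDesc, dstDesc):
--     diffs = []
--     buggy = []
--     fixed = []
--     for i in range(srcDesc.__len__()):
--         if srcDesc[i].lower() != dstDesc[i].lower():
--             diffs.append((srcDesc[i].lower(), dstDesc[i].lower()))
--             buggy.append(srcDesc[i].lower())
--             fixed.append(dstDesc[i].lower())
--
--     buggy = list(set(buggy))
--     fixed = list(set(fixed))
--
--     if buggy.__len__() == fixed.__len__() and (buggy.__len__() == 1 or buggy.__len__() == 0 ):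
--         return True
--     else:
--         return False
-- ===== SOURCE B (Python) =====
-- def oneWordDiff(srcDesc, dstDesc):
--     cand = None
--     ok = True
--     for i in range(len(srcDesc)):
--         s = srcDesc[i].lower()
--         d = dstDesc[i].lower()
--         if s != d:
--             if cand is None:
--                 cand = (s, d)
--             elif cand != (s, d):
--                 ok = False
--     return ok
-- ===== Notes on version B (the rewrite author's own statement) =====
-- stated objective: simpler
-- what changed: Replaces the three accumulated lists and the two set-deduplication passes by a single streaming candidate pair plus a boolean flag: True iff at most one distinct (lowered) differing pair occurs.
import Mathlib
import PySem

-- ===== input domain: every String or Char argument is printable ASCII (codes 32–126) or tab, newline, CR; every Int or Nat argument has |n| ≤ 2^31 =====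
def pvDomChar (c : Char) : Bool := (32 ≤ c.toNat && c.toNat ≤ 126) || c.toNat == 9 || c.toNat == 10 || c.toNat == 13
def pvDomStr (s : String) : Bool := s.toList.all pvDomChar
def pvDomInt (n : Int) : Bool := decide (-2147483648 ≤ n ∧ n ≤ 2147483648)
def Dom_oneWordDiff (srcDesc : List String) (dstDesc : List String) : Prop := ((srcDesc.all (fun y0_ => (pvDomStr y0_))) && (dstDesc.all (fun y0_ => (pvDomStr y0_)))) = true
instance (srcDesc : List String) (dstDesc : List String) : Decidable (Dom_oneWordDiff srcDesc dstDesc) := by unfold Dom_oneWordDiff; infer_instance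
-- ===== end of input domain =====

-- B replaces A's three accumulated lists and two set-deduplication passes by one
-- streaming candidate pair plus a boolean flag (objective: simpler).

-- ===== PORT A =====
def oneWordDiff (srcDesc : List String) (dstDesc : List String) : Bool :=
  let st := (PySem.List.pyRange 0 (srcDesc.length : Int) 1).foldl
    (fun (acc : List (String × String) × List String × List String) i =>
      let s := PySem.Str.lower (PySem.List.pyGetD srcDesc i "")
      let d := PySem.Str.lower (PySem.List.pyGetD dstDesc i "")
      if s ≠ d then (acc.1 ++ [(s, d)], acc.2.1 ++ [s], acc.2.2 ++ [d]) else acc)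
    ([], [], [])
  let buggy : PySem.Set String := PySem.Set.ofList st.2.1
  let fixed : PySem.Set String := PySem.Set.ofList st.2.2
  decide (buggy.length = fixed.length ∧ (buggy.length = 1 ∨ buggy.length = 0))

-- ===== PORT B =====
def oneWordDiff_alt (srcDesc : List String) (dstDesc : List String) : Bool :=
  let st := (PySem.List.pyRange 0 (srcDesc.length : Int) 1).foldl
    (fun (acc : Option (String × String) × Bool) i =>
      let s := PySem.Str.lower (PySem.List.pyGetD srcDesc i "")
      let d := PySem.Str.lower (PySem.List.pyGetD dstDesc i "")
      if s ≠ d then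
        match acc.1 with
        | none => (some (s, d), acc.2)
        | some c => if c ≠ (s, d) then (acc.1, false) else acc
      else acc)
    (none, true)
  st.2

-- ===== PRECONDITION & SPEC =====
-- Pre_ excludes exactly the inputs where A raises IndexError: dstDesc shorter than srcDesc.
def Pre_oneWordDiff (srcDesc : List String) (dstDesc : List String) : Prop :=
  srcDesc.length ≤ dstDesc.length
instance (srcDesc : List String) (dstDesc : List String) : Decidable (Pre_oneWordDiff srcDesc dstDesc) := by unfold Pre_oneWordDiff; infer_instance
def pvWitness_oneWordDiff : List String × List String := (["Foo", "bar"], ["foo", "Baz"])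

def Spec_oneWordDiff (srcDesc : List String) (dstDesc : List String) (out : Bool) : Prop := out = oneWordDiff_alt srcDesc dstDesc
instance (srcDesc : List String) (dstDesc : List String) (out : Bool) : Decidable (Spec_oneWordDiff srcDesc dstDesc out) := by unfold Spec_oneWordDiff; infer_instance

-- ===== CLAIM (what is proved, stated in full; the proofs are below) =====
def Claim_equal_oneWordDiff : Prop := ∀ (srcDesc : List String) (dstDesc : List String), Dom_oneWordDiff srcDesc dstDesc → Pre_oneWordDiff srcDesc dstDesc → Spec_oneWordDiff srcDesc dstDesc (oneWordDiff srcDesc dstDesc)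

-- ===== LEMMAS AND PROOFS =====

-- the lowered pairs both loops traverse
def pvPairFn (srcDesc dstDesc : List String) (i : Int) : String × String :=
  (PySem.Str.lower (PySem.List.pyGetD srcDesc i ""), PySem.Str.lower (PySem.List.pyGetD dstDesc i ""))

def pvPairs (srcDesc dstDesc : List String) : List (String × String) :=
  (PySem.List.pyRange 0 (srcDesc.length : Int) 1).map (pvPairFn srcDesc dstDesc)

def pvNe (p : String × String) : Bool := decide (p.1 ≠ p.2)

-- generic per-pair steps of the two loops
def pvStepA (acc : List (String × String) × List String × List String) (p : String × String) :
    List (String × String) × List String × List String :=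
  if p.1 ≠ p.2 then (acc.1 ++ [p], acc.2.1 ++ [p.1], acc.2.2 ++ [p.2]) else acc

def pvStepB (acc : Option (String × String) × Bool) (p : String × String) :
    Option (String × String) × Bool :=
  if p.1 ≠ p.2 then
    match acc.1 with
    | none => (some p, acc.2)
    | some c => if c ≠ p then (acc.1, false) else acc
  else acc

def pvFlag (D : List (String × String)) : Bool :=
  match D with
  | [] => true
  | q :: rest => rest.all (fun p => p == q)

theorem pvFoldA (L : List (String × String)) (acc : List (String × String) × List String × List String) :
    L.foldl pvStepA acc =
      (acc.1 ++ L.filter pvNe, acc.2.1 ++ (L.filter pvNe).map Prod.fst,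
       acc.2.2 ++ (L.filter pvNe).map Prod.snd) := by
  induction L generalizing acc with
  | nil => simp
  | cons p L ih =>
    by_cases h : p.1 ≠ p.2
    · simp [pvStepA, pvNe, h, ih]
    · simp [pvStepA, pvNe, h, ih]

theorem pvFoldB_filter (L : List (String × String)) (acc : Option (String × String) × Bool) :
    L.foldl pvStepB acc = (L.filter pvNe).foldl pvStepB acc := by
  induction L generalizing acc with
  | nil => rfl
  | cons p L ih =>
    by_cases h : p.1 ≠ p.2
    · simp [pvNe, h, List.foldl_cons, ih]
    · simp [pvStepB, pvNe, h, ih]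

theorem pvFoldB (D : List (String × String)) (hD : ∀ p ∈ D, p.1 ≠ p.2)
    (c : Option (String × String)) (b : Bool) :
    (D.foldl pvStepB (c, b)).2 =
      (b && (match c with | none => pvFlag D | some q => D.all (fun p => p == q))) := by
  induction D generalizing c b with
  | nil => cases c <;> simp [pvFlag]
  | cons p D ih =>
    have hp : p.1 ≠ p.2 := hD p (List.mem_cons_self ..)
    have hD' : ∀ q ∈ D, q.1 ≠ q.2 := fun q hq => hD q (List.mem_cons_of_mem _ hq)
    cases c with
    | none =>
      simp only [List.foldl_cons, pvStepB, if_pos hp, ih hD', pvFlag]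
    | some q =>
      by_cases hq : q ≠ p
      · have hbe : (p == q) = false := beq_eq_false_iff_ne.mpr (fun e => hq e.symm)
        simp only [List.foldl_cons, pvStepB, if_pos hp, if_pos hq, ih hD',
          List.all_cons, hbe, Bool.false_and, Bool.and_false]
      · have hqp : q = p := not_not.mp hq
        have hbe : (p == q) = true := beq_iff_eq.mpr hqp.symm
        simp only [List.foldl_cons, pvStepB, if_pos hp, if_neg hq, ih hD',
          List.all_cons, hbe, Bool.true_and]

def pvD (srcDesc dstDesc : List String) : List (String × String) :=
  (pvPairs srcDesc dstDesc).filter pvNe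

theorem pvOfListConst {α : Type} [BEq α] [LawfulBEq α] (a : α) (l : List α)
    (h : ∀ x ∈ l, x = a) : PySem.Set.ofList (a :: l) = [a] := by
  rw [PySem.Set.ofList_cons]
  have : PySem.Set.discard (PySem.Set.ofList l) a = [] := by
    rw [List.eq_nil_iff_forall_not_mem]
    intro y hy
    have := (PySem.Set.mem_discard _ _ _).mp hy
    exact this.2 (h y ((PySem.Set.mem_ofList _ _).mp this.1))
  rw [this]

theorem pvLenOne {α : Type} [BEq α] [LawfulBEq α] (l : List α)
    (h : (PySem.Set.ofList l).length = 1) : ∀ x ∈ l, ∀ y ∈ l, x = y := by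
  obtain ⟨a, ha⟩ := List.length_eq_one_iff.mp h
  intro x hx y hy
  have hx' : x ∈ PySem.Set.ofList l := (PySem.Set.mem_ofList _ _).mpr hx
  have hy' : y ∈ PySem.Set.ofList l := (PySem.Set.mem_ofList _ _).mpr hy
  rw [ha] at hx' hy'
  simp at hx' hy'
  rw [hx', hy']

theorem pvCrux (D : List (String × String)) :
    decide ((PySem.Set.ofList (D.map Prod.fst)).length = (PySem.Set.ofList (D.map Prod.snd)).length ∧
      ((PySem.Set.ofList (D.map Prod.fst)).length = 1 ∨ (PySem.Set.ofList (D.map Prod.fst)).length = 0)) =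
      pvFlag D := by
  cases D with
  | nil => decide
  | cons q rest =>
    by_cases hall : ∀ p ∈ rest, p = q
    · have hf : PySem.Set.ofList ((q :: rest).map Prod.fst) = [q.1] := by
        rw [List.map_cons]
        exact pvOfListConst _ _ (by
          intro x hx
          obtain ⟨p, hp, rfl⟩ := List.mem_map.mp hx
          rw [hall p hp])
      have hs : PySem.Set.ofList ((q :: rest).map Prod.snd) = [q.2] := by
        rw [List.map_cons]
        exact pvOfListConst _ _ (by
          intro x hx
          obtain ⟨p, hp, rfl⟩ := List.mem_map.mp hx
          rw [hall p hp])
      have hflag : pvFlag (q :: rest) = true := by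
        simp only [pvFlag, List.all_eq_true]
        intro p hp
        exact beq_iff_eq.mpr (hall p hp)
      rw [hf, hs, hflag]
      simp
    · simp only [not_forall, exists_prop] at hall
      obtain ⟨r, hr, hne⟩ := hall
      have hflag : pvFlag (q :: rest) = false := by
        simp only [pvFlag, List.all_eq_false]
        exact ⟨r, hr, by simp [hne]⟩
      rw [hflag]
      apply decide_eq_false
      rintro ⟨hlen, h1 | h0⟩
      · have hone : (PySem.Set.ofList ((q :: rest).map Prod.snd)).length = 1 := by omega
        have hfsts := pvLenOne _ h1 r.1 (List.mem_map_of_mem (List.mem_cons_of_mem _ hr))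
          q.1 (List.mem_map_of_mem (List.mem_cons_self ..))
        have hsnds := pvLenOne _ hone r.2 (List.mem_map_of_mem (List.mem_cons_of_mem _ hr))
          q.2 (List.mem_map_of_mem (List.mem_cons_self ..))
        exact hne (Prod.ext hfsts hsnds)
      · have : PySem.Set.ofList ((q :: rest).map Prod.fst) = [] := List.length_eq_zero_iff.mp h0
        rw [List.map_cons, PySem.Set.ofList_cons] at this
        exact List.cons_ne_nil _ _ this

theorem pvA_eq (srcDesc dstDesc : List String) :
    oneWordDiff srcDesc dstDesc =
      decide ((PySem.Set.ofList ((pvD srcDesc dstDesc).map Prod.fst)).length =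
          (PySem.Set.ofList ((pvD srcDesc dstDesc).map Prod.snd)).length ∧
        ((PySem.Set.ofList ((pvD srcDesc dstDesc).map Prod.fst)).length = 1 ∨
          (PySem.Set.ofList ((pvD srcDesc dstDesc).map Prod.fst)).length = 0)) := by
  have h1 : (pvPairs srcDesc dstDesc).foldl pvStepA ([], [], []) =
      (PySem.List.pyRange 0 (srcDesc.length : Int) 1).foldl
        (fun (acc : List (String × String) × List String × List String) i =>
          let s := PySem.Str.lower (PySem.List.pyGetD srcDesc i "")
          let d := PySem.Str.lower (PySem.List.pyGetD dstDesc i "")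
          if s ≠ d then (acc.1 ++ [(s, d)], acc.2.1 ++ [s], acc.2.2 ++ [d]) else acc)
        ([], [], []) := by
    rw [pvPairs, List.foldl_map]
    rfl
  unfold oneWordDiff
  rw [← h1, pvFoldA]
  simp [pvD]

theorem pvB_eq (srcDesc dstDesc : List String) :
    oneWordDiff_alt srcDesc dstDesc = pvFlag (pvD srcDesc dstDesc) := by
  have h1 : (pvPairs srcDesc dstDesc).foldl pvStepB (none, true) =
      (PySem.List.pyRange 0 (srcDesc.length : Int) 1).foldl
        (fun (acc : Option (String × String) × Bool) i =>
          let s := PySem.Str.lower (PySem.List.pyGetD srcDesc i "")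
          let d := PySem.Str.lower (PySem.List.pyGetD dstDesc i "")
          if s ≠ d then
            match acc.1 with
            | none => (some (s, d), acc.2)
            | some c => if c ≠ (s, d) then (acc.1, false) else acc
          else acc)
        (none, true) := by
    rw [pvPairs, List.foldl_map]
    rfl
  have hD : ∀ p ∈ pvD srcDesc dstDesc, p.1 ≠ p.2 := by
    intro p hp
    exact of_decide_eq_true (List.mem_filter.mp hp).2
  unfold oneWordDiff_alt
  rw [← h1, pvFoldB_filter, ← pvD, pvFoldB _ hD]
  simp

-- ===== VERDICT (by name: the statement is the Claim_ definition above) =====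
theorem oneWordDiff_spec : Claim_equal_oneWordDiff := by
  intro srcDesc dstDesc _ _
  unfold Spec_oneWordDiff
  rw [pvA_eq, pvB_eq, pvCrux]
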